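-- pv_equiv track=rewrite | github.com/VridhiJ/Shors-Algo | shor.py | find_r_values
-- ===== SOURCE A (Python) =====
-- def find_r_values(g, n, num_values):
--     r_values = []
--     r = 1
--
--     while len(r_values) < num_values:
--         # Check if (g^r)/n leaves remainder 1
--         if (g ** r) % n == 1:
--             r_values.append(r)
--
--         r += 1
--
--     return r_values
-- ===== SOURCE B (Python) =====
-- def find_r_values(g, n, num_values):
--     # Nested decomposition with an incremental modular residue: the inner scan
--     # advances val = (val * g) % n one bounded-size multiplication per step
--     # (no from-scratch bignum power) and reports the next exponent whose
--     # residue is 1; the outer loop collects exactly num_values such exponents.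
--     def next_hit(val, r):
--         while True:
--             val = (val * g) % n
--             if val == 1:
--                 return r, val
--             r += 1
--
--     r_values = []
--     val, r = 1, 1
--     for _ in range(num_values):
--         r_hit, val = next_hit(val, r)
--         r_values.append(r_hit)
--         r = r_hit + 1
--     return r_values
-- ===== Notes on version B (the rewrite author's own statement) =====
-- stated objective: faster
-- what changed: B replaces A's single while loop that recomputes the full bignum power g**r from scratch each iteration by a nested decomposition: an outer loop over the requested count and an inner scan advancing a running residue val=(val*g)%n with one bounded-size multiplication per step; intended as faster — a timing run measured B 36.7x faster at the largest size both programs finished, but could not confirm it at sizes where A (and on some inputs B) times out.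
import Mathlib
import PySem

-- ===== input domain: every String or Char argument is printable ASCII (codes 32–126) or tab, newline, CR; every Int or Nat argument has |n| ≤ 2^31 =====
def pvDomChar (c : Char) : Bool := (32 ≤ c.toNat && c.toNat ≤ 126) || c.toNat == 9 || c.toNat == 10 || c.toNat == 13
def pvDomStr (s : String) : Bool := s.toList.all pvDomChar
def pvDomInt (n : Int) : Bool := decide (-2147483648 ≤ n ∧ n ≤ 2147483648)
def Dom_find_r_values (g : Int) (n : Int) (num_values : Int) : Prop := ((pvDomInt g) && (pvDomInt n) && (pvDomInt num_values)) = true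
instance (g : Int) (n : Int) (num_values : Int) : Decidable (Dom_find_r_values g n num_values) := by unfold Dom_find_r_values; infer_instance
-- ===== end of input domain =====

-- B replaces A's single while loop (which recomputes the full bignum power g**r
-- from scratch every iteration) by a nested decomposition: an outer loop over the
-- requested count and an inner scan advancing a running residue val=(val*g)%n one
-- bounded-size multiplication per step (intended as faster; a timing run
-- measured B 36.7x faster at the largest size both programs finished, but could
-- not confirm it at sizes where A times out).
-- Both Python loops are unbounded; the ports run them on a shared fuel budget and
-- are proved equal for every fuel, so no termination argument is needed.

-- ===== PORT A =====
def findRLoopA (g : Int) (n : Int) (num_values : Int) : Nat → Int → List Int → List Int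
  | 0, _, r_values => r_values
  | fuel + 1, r, r_values =>
    if (r_values.length : Int) < num_values then
      findRLoopA g n num_values fuel (r + 1)
        (if PySem.Int.mod (g ^ r.toNat) n = 1 then r_values ++ [r] else r_values)
    else r_values

def find_r_values (g : Int) (n : Int) (num_values : Int) : List Int :=
  findRLoopA g n num_values ((num_values * n).toNat + 1) 1 []

-- ===== PORT B =====
-- inner `while True`: returns (r_hit, val-at-hit, remaining fuel), none if fuel runs out
def nextHitB (g : Int) (n : Int) : Nat → Int → Int → Option (Int × Int × Nat)
  | 0, _, _ => none
  | fuel + 1, val, r =>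
    let v := PySem.Int.mod (val * g) n
    if v = 1 then some (r, v, fuel) else nextHitB g n fuel v (r + 1)

-- outer `for _ in range(num_values)`: structural recursion on the remaining count
def outerLoopB (g : Int) (n : Int) : Nat → Nat → Int → Int → List Int → List Int
  | 0, _, _, _, r_values => r_values
  | k + 1, fuel, val, r, r_values =>
    match nextHitB g n fuel val r with
    | none => r_values
    | some (r_hit, val', fuel') => outerLoopB g n k fuel' val' (r_hit + 1) (r_values ++ [r_hit])

def find_r_values_alt (g : Int) (n : Int) (num_values : Int) : List Int :=
  outerLoopB g n num_values.toNat ((num_values * n).toNat + 1) 1 1 []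

-- ===== PRECONDITION & SPEC =====
-- Pre_ excludes exactly the inputs where Python A never returns: n = 0 raises
-- ZeroDivisionError, and for num_values ≥ 1 the loop diverges unless n ≥ 2 and
-- gcd(g, n) = 1 (otherwise g^r % n is never 1).
def Pre_find_r_values (g : Int) (n : Int) (num_values : Int) : Prop :=
  num_values ≤ 0 ∨ (2 ≤ n ∧ Int.gcd g n = 1)
instance (g : Int) (n : Int) (num_values : Int) : Decidable (Pre_find_r_values g n num_values) := by unfold Pre_find_r_values; infer_instance

def pvWitness_find_r_values : Int × Int × Int := (7, 15, 3)

def Spec_find_r_values (g : Int) (n : Int) (num_values : Int) (out : List Int) : Prop := out = find_r_values_alt g n num_values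
instance (g : Int) (n : Int) (num_values : Int) (out : List Int) : Decidable (Spec_find_r_values g n num_values out) := by unfold Spec_find_r_values; infer_instance

-- ===== CLAIM (what is proved, stated in full; the proofs are below) =====
def Claim_equal_find_r_values : Prop := ∀ (g : Int) (n : Int) (num_values : Int), Dom_find_r_values g n num_values → Pre_find_r_values g n num_values → Spec_find_r_values g n num_values (find_r_values g n num_values)

-- ===== LEMMAS AND PROOFS =====

-- Multiplying a floor-mod residue: ((a fmod n) * b) fmod n = (a * b) fmod n,
-- also true for n = 0 since fmod x 0 = x.
theorem pv_fmod_mul_left (a b n : Int) : ((Int.fmod a n) * b).fmod n = (a * b).fmod n := by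
  have h : a * b = Int.fmod a n * b + n * (Int.fdiv a n * b) := by
    rw [Int.fmod_def]; ring
  rw [h, Int.add_mul_fmod_self_left]

-- Fuel-indexed bisimulation: A's single loop at counter r+1 with acc of length
-- num_values - k equals B's nested loops with k outer rounds left, provided val's
-- next residue agrees with g^(r+1)'s.
theorem pv_loop_agree (g n num_values : Int) :
    ∀ (fuel : Nat) (r val : Int) (acc : List Int) (k : Nat), 0 ≤ r →
      PySem.Int.mod (val * g) n = PySem.Int.mod (g ^ (r.toNat + 1)) n →
      (k : Int) = num_values - acc.length →
      findRLoopA g n num_values fuel (r + 1) acc =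
        outerLoopB g n k fuel val (r + 1) acc := by
  intro fuel
  induction fuel with
  | zero =>
    intro r val acc k _ _ _
    cases k <;> simp [findRLoopA, outerLoopB, nextHitB]
  | succ f ih =>
    intro r val acc k hr hval hk
    cases k with
    | zero =>
      have hlen : ¬ ((acc.length : Int) < num_values) := by
        simp at hk; omega
      simp [findRLoopA, outerLoopB, hlen]
    | succ j =>
      have hlen : (acc.length : Int) < num_values := by
        push_cast at hk; omega
      have hidx : (r + 1).toNat = r.toNat + 1 := by omega
      simp only [findRLoopA, outerLoopB, nextHitB, hlen, if_pos, hidx, ← hval]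
      by_cases hv : PySem.Int.mod (val * g) n = 1
      · simp only [hv, if_pos]
        have hval' : PySem.Int.mod (1 * g) n = PySem.Int.mod (g ^ ((r + 1).toNat + 1)) n := by
          have h2 : g ^ ((r + 1).toNat + 1) = g ^ (r.toNat + 1) * g := by
            rw [hidx, pow_succ]
          rw [h2]
          show (1 * g).fmod n = (g ^ (r.toNat + 1) * g).fmod n
          rw [← pv_fmod_mul_left (g ^ (r.toNat + 1)) g n]
          have hm1 : (g ^ (r.toNat + 1)).fmod n = 1 := by
            simp only [PySem.Int.mod] at hval hv; rw [← hval]; exact hv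
          rw [hm1]
        have := ih (r + 1) 1 (acc ++ [r + 1]) j (by omega) hval'
          (by simp; push_cast at hk ⊢; omega)
        simpa using this
      · simp only [hv, if_neg, not_false_iff]
        have hval' : PySem.Int.mod (PySem.Int.mod (val * g) n * g) n
            = PySem.Int.mod (g ^ ((r + 1).toNat + 1)) n := by
          have h2 : g ^ ((r + 1).toNat + 1) = g ^ (r.toNat + 1) * g := by
            rw [hidx, pow_succ]
          rw [h2]
          show ((val * g).fmod n * g).fmod n = (g ^ (r.toNat + 1) * g).fmod n
          have hval2 : (val * g).fmod n = (g ^ (r.toNat + 1)).fmod n := by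
            simp only [PySem.Int.mod] at hval; exact hval
          rw [pv_fmod_mul_left, ← pv_fmod_mul_left (val * g) g n,
              ← pv_fmod_mul_left (g ^ (r.toNat + 1)) g n, hval2]
        have h := ih (r + 1) (PySem.Int.mod (val * g) n) acc (j + 1) (by omega) hval'
          (by push_cast at hk ⊢; omega)
        -- both sides of B reduce to the same match on nextHitB f v (r+2)
        rw [h]
        simp [outerLoopB]

-- ===== VERDICT (by name: the statement is the Claim_ definition above) =====
theorem find_r_values_spec : Claim_equal_find_r_values := by
  intro g n num_values _ _
  unfold Spec_find_r_values find_r_values find_r_values_alt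
  by_cases hnv : 0 < num_values
  · have h := pv_loop_agree g n num_values ((num_values * n).toNat + 1) 0 1 [] num_values.toNat
      le_rfl (by norm_num) (by simp; omega)
    simpa using h
  · have h0 : num_values.toNat = 0 := by omega
    rw [h0]
    simp only [findRLoopA, outerLoopB]
    rw [if_neg (by simp; omega)]
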